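-- pv_equiv track=rewrite | github.com/Singular/Singular | Singular/cnf2ideal.py | gen_clauses
-- ===== SOURCE A (Python) =====
-- def gen_clauses(input_numbers):
--     i=0
--     erg=[]
--     act=[]
--     for i in input_numbers:
--         if (i==0):
--             if act:
--                 erg.append(act)
--                 act=[]
--         else:
--             act.append(i)
--     return erg
-- ===== SOURCE B (Python) =====
-- def gen_clauses(input_numbers):
--     xs = list(input_numbers)
--     try:
--         k = xs.index(0)
--     except ValueError:
--         return []
--     head = xs[:k]
--     rest = gen_clauses(xs[k + 1:])
--     return [head] + rest if head else rest
-- ===== Notes on version B (the rewrite author's own statement) =====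
-- stated objective: alternative
-- what changed: Replaced the single accumulator loop by a recursive decomposition: find the first zero, emit the (non-empty) prefix before it, and recurse on the suffix after it; the unterminated trailing run is dropped because the no-zero base case emits nothing.
import Mathlib
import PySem

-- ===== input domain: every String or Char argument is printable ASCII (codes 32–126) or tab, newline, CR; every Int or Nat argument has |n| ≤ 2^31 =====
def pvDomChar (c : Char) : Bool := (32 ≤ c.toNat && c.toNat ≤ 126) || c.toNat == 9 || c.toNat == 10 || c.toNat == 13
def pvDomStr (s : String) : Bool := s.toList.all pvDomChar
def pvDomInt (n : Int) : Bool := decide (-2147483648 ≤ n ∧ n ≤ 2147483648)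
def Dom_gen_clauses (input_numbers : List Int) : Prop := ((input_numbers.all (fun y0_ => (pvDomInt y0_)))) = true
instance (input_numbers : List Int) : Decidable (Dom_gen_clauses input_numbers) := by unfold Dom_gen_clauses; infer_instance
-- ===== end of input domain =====

-- B replaces A's accumulator loop by recursion on the first zero (emit prefix, recurse on suffix); alternative decomposition, same cost.

-- ===== PORT A =====
-- A's loop state: (erg, act); one step per element, branches in A's order.
def pvStepA (s : List (List Int) × List Int) (i : Int) : List (List Int) × List Int :=
  if i == 0 then
    (if s.2 ≠ [] then (s.1 ++ [s.2], []) else s)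
  else
    (s.1, s.2 ++ [i])

def gen_clauses (input_numbers : List Int) : List (List Int) :=
  (input_numbers.foldl pvStepA ([], [])).1

-- ===== PORT B =====
def gen_clauses_alt (input_numbers : List Int) : List (List Int) :=
  match h : PySem.List.index? input_numbers 0 with
  | none => []
  | some k =>
    let head := PySem.List.slice input_numbers none (some (k : Int))
    let rest := gen_clauses_alt (PySem.List.slice input_numbers (some ((k : Int) + 1)) none)
    if head ≠ [] then head :: rest else rest
termination_by input_numbers.length
decreasing_by
  obtain ⟨hk, _, _⟩ := PySem.List.getElem_of_index?_eq_some h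
  have : ((k : Int) + 1) = ((k + 1 : Nat) : Int) := by push_cast; ring
  rw [this, PySem.List.slice_from_natCast]
  simp [List.length_drop]; omega

-- ===== PRECONDITION & SPEC =====
def Spec_gen_clauses (input_numbers : List Int) (out : List (List Int)) : Prop := out = gen_clauses_alt input_numbers
instance (input_numbers : List Int) (out : List (List Int)) : Decidable (Spec_gen_clauses input_numbers out) := by unfold Spec_gen_clauses; infer_instance

-- ===== CLAIM (what is proved, stated in full; the proofs are below) =====
def Claim_equal_gen_clauses : Prop := ∀ (input_numbers : List Int), Dom_gen_clauses input_numbers → Spec_gen_clauses input_numbers (gen_clauses input_numbers)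

-- ===== LEMMAS AND PROOFS =====

-- A's loop over a zero-free list just extends act.
lemma foldl_stepA_no_zero (xs : List Int) (hx : (0 : Int) ∉ xs)
    (erg : List (List Int)) (act : List Int) :
    xs.foldl pvStepA (erg, act) = (erg, act ++ xs) := by
  induction xs generalizing act with
  | nil => simp
  | cons x xs ih =>
    have hx0 : x ≠ 0 := fun h => hx (h ▸ List.mem_cons_self)
    have hxs : (0 : Int) ∉ xs := fun h => hx (List.mem_cons_of_mem _ h)
    simp [pvStepA, hx0, ih hxs]

-- Unfolding B's recursion when the list has no zero.
lemma alt_of_index?_none (xs : List Int) (h : PySem.List.index? xs 0 = none) :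
    gen_clauses_alt xs = [] := by
  rw [gen_clauses_alt]
  rw [PySem.List.index?_eq_idxOf?] at h
  split
  · rfl
  · rename_i k heq
    rw [PySem.List.index?_eq_idxOf?, h] at heq; cases heq

-- Unfolding B's recursion at the first zero, with the slices written as take/drop.
lemma alt_of_index?_some (xs : List Int) (k : Nat) (h : PySem.List.index? xs 0 = some k) :
    gen_clauses_alt xs =
      if xs.take k ≠ [] then xs.take k :: gen_clauses_alt (xs.drop (k + 1))
      else gen_clauses_alt (xs.drop (k + 1)) := by
  rw [gen_clauses_alt]
  rw [PySem.List.index?_eq_idxOf?] at h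
  split
  · rename_i heq; rw [PySem.List.index?_eq_idxOf?, h] at heq; cases heq
  · rename_i k' heq
    rw [PySem.List.index?_eq_idxOf?, h] at heq
    injection heq with hk; subst hk
    dsimp only
    have hc : ((k : Int) + 1) = ((k + 1 : Nat) : Int) := by push_cast; ring
    rw [PySem.List.slice_to_natCast, hc, PySem.List.slice_from_natCast]

-- Main invariant: A's fold from (erg, []) produces erg ++ B's result.
theorem foldl_stepA_eq_alt (xs : List Int) (erg : List (List Int)) :
    (xs.foldl pvStepA (erg, [])).1 = erg ++ gen_clauses_alt xs := by
  cases h : PySem.List.index? xs 0 with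
  | none =>
    have hx : (0 : Int) ∉ xs := (PySem.List.index?_eq_none_iff xs 0).mp h
    rw [alt_of_index?_none xs h, foldl_stepA_no_zero xs hx]
    simp
  | some k =>
    obtain ⟨pre, suf, hxs, hlen, hpre⟩ := (PySem.List.index?_eq_some_iff xs 0 k).mp h
    have hsuf : suf.length < xs.length := by subst hxs; simp; omega
    have htake : xs.take k = pre := by rw [hxs, ← hlen, List.take_left]
    have hdrop : xs.drop (k + 1) = suf := by
      have h2 : pre ++ 0 :: suf = (pre ++ [0]) ++ suf := by simp
      have h3 : pre.length + 1 = (pre ++ [(0 : Int)]).length := by simp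
      rw [hxs, ← hlen, h2, h3, List.drop_left]
    rw [alt_of_index?_some xs k h, htake, hdrop]
    conv_lhs => rw [hxs]
    rw [List.foldl_append, foldl_stepA_no_zero pre hpre erg []]
    simp only [List.nil_append, List.foldl_cons]
    have hstep : pvStepA (erg, pre) 0 =
        (erg ++ (if pre ≠ [] then [pre] else []), []) := by
      by_cases hp : pre = [] <;> simp [pvStepA, hp]
    rw [hstep, foldl_stepA_eq_alt suf]
    by_cases hp : pre = [] <;> simp [hp]
termination_by xs.length

-- ===== VERDICT (by name: the statement is the Claim_ definition above) =====
theorem gen_clauses_spec : Claim_equal_gen_clauses := by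
  intro xs _
  unfold Spec_gen_clauses gen_clauses
  simpa using foldl_stepA_eq_alt xs []
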